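-- pv_equiv track=rewrite | github.com/Xiaoyu-Xing/algorithms | google/shortest_coupon.py | shortes_coupon
-- ===== SOURCE A (Python) =====
-- def shortes_coupon(s: 'list') ->'int':
--     ret = len(s) + 1
--     count = {}
--     for i, number in enumerate(s):
--         if number in count:
--             ret = min(ret, i - count[number] + 1)
--         count[number] = i
--     if ret == len(s) + 1:
--         return -1
--     return ret
-- ===== SOURCE B (Python) =====
-- def shortes_coupon(s: 'list') -> 'int':
--     best = len(s) + 1
--     for i, x in enumerate(s):
--         rest = s[i + 1:]
--         if x in rest:
--             best = min(best, rest.index(x) + 2)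
--     return -1 if best == len(s) + 1 else best
-- ===== Notes on version B (the rewrite author's own statement) =====
-- stated objective: alternative
-- what changed: Instead of A's online dict of last-seen indices, B scans forward from each position and takes the distance to the first later occurrence of the same value (rest.index), keeping no auxiliary state between iterations.
import Mathlib
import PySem

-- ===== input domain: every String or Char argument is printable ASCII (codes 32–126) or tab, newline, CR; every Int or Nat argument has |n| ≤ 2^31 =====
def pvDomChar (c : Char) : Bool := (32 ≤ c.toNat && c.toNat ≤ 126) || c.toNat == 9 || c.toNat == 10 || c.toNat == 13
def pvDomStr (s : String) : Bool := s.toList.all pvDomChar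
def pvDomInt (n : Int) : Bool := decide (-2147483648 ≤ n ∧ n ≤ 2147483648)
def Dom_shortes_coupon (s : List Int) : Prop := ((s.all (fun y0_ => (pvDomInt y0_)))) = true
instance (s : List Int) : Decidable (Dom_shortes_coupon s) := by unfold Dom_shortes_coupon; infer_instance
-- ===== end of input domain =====

-- B replaces A's running dict of last-seen indices by, for each position, a forward
-- scan to the first later occurrence of the same value (alternative decomposition).

-- ===== PORT A =====
-- loop body of A: 'if number in count: ret = min(ret, i - count[number] + 1); count[number] = i'
def stepA (st : Int × PySem.Dict Int Int) (p : Int × Int) : Int × PySem.Dict Int Int :=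
  match st.2.get? p.2 with
  | some j => (min st.1 (p.1 - j + 1), st.2.insert p.2 p.1)
  | none => (st.1, st.2.insert p.2 p.1)

def shortes_coupon (s : List Int) : Int :=
  let r := (PySem.List.enumerate s 0).foldl stepA ((s.length : Int) + 1, PySem.Dict.empty)
  if r.1 = (s.length : Int) + 1 then -1 else r.1

-- ===== PORT B =====
-- loop body of B: 'rest = s[i+1:];  if x in rest: best = min(best, rest.index(x) + 2)'
def stepB (s : List Int) (best : Int) (p : Int × Int) : Int :=
  let rest := PySem.List.slice s (some (p.1 + 1)) none
  if p.2 ∈ rest then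
    match PySem.List.index? rest p.2 with
    | some k => min best ((k : Int) + 2)
    | none => best   -- unreachable: guarded by membership
  else best

def shortes_coupon_alt (s : List Int) : Int :=
  let best := (PySem.List.enumerate s 0).foldl (stepB s) ((s.length : Int) + 1)
  if best = (s.length : Int) + 1 then -1 else best

-- ===== PRECONDITION & SPEC =====
def Spec_shortes_coupon (s : List Int) (out : Int) : Prop := out = shortes_coupon_alt s
instance (s : List Int) (out : Int) : Decidable (Spec_shortes_coupon s out) := by unfold Spec_shortes_coupon; infer_instance

-- ===== CLAIM (what is proved, stated in full; the proofs are below) =====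
def Claim_equal_shortes_coupon : Prop := ∀ (s : List Int), Dom_shortes_coupon s → Spec_shortes_coupon s (shortes_coupon s)

-- ===== LEMMAS AND PROOFS =====

/-- g is the (inclusive) window length of some pair of equal elements of s. -/
def PairGap (s : List Int) (g : Int) : Prop :=
  ∃ i j : Nat, ∃ hi : i < s.length, ∃ hj : j < s.length,
    i < j ∧ s[i] = s[j] ∧ g = (j : Int) - (i : Int) + 1

/-- characterization of the loop result shared by both ports -/
def Ch (s : List Int) (r : Int) : Prop :=
  r ≤ (s.length : Int) + 1 ∧ (∀ g, PairGap s g → r ≤ g) ∧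
  (r = (s.length : Int) + 1 ∨ PairGap s r)

lemma Ch_unique {s : List Int} {r₁ r₂ : Int} (h₁ : Ch s r₁) (h₂ : Ch s r₂) : r₁ = r₂ := by
  obtain ⟨le₁, min₁, mem₁⟩ := h₁
  obtain ⟨le₂, min₂, mem₂⟩ := h₂
  apply le_antisymm
  · rcases mem₂ with h | h
    · omega
    · exact min₁ _ h
  · rcases mem₁ with h | h
    · omega
    · exact min₂ _ h

lemma loopA (s : List Int) : ∀ (xs : List Int) (k : Nat) (ret : Int) (count : PySem.Dict Int Int),
    s.drop k = xs →
    (∀ v j, count.get? v = some j → ∃ jn : Nat, j = (jn : Int) ∧ jn < k ∧ ∃ h : jn < s.length, s[jn] = v) →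
    (∀ i : Nat, ∀ h : i < s.length, i < k → ∃ j, count.get? s[i] = some j ∧ (i : Int) ≤ j) →
    ret ≤ (s.length : Int) + 1 →
    (ret = (s.length : Int) + 1 ∨ PairGap s ret) →
    (∀ i j : Nat, ∀ hi : i < s.length, ∀ hj : j < s.length, i < j → j < k → s[i] = s[j] → ret ≤ (j : Int) - (i : Int) + 1) →
    Ch s (((PySem.List.enumerate xs (k : Int)).foldl stepA (ret, count)).1) := by
  intro xs
  induction xs with
  | nil =>
    intro k ret count hdrop hsound hcomp hle hmem hmin
    refine ⟨hle, ?_, hmem⟩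
    have hk : s.length ≤ k := by
      have := congrArg List.length hdrop; simp at this; omega
    rintro g ⟨i, j, hi, hj, hij, hs, rfl⟩
    exact hmin i j hi hj hij (by omega) hs
  | cons x xs ih =>
    intro k ret count hdrop hsound hcomp hle hmem hmin
    have hk : k < s.length := by
      by_contra h
      push_neg at h
      rw [List.drop_eq_nil_of_le h] at hdrop
      exact (List.cons_ne_nil x xs) hdrop.symm
    have hsk : s[k] = x := by
      have h0 : (s.drop k)[0]'(by rw [hdrop]; simp) = x := by
        simp [hdrop]
      rwa [List.getElem_drop] at h0
    have hdrop' : s.drop (k + 1) = xs := by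
      have h1 : (s.drop k).drop 1 = xs := by rw [hdrop]; simp
      rw [List.drop_drop] at h1
      exact h1
    rw [PySem.List.enumerate_cons, List.foldl_cons]
    have hcast : (k : Int) + 1 = ((k + 1 : Nat) : Int) := by push_cast; ring
    rw [hcast]
    cases hget : count.get? x with
    | none =>
      have hstep : stepA (ret, count) ((k : Int), x) = (ret, count.insert x (k : Int)) := by
        simp [stepA, hget]
      rw [hstep]
      apply ih (k + 1) ret (count.insert x (k : Int)) hdrop' ?_ ?_ hle hmem ?_
      · intro v j hj
        rw [PySem.Dict.get?_insert] at hj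
        by_cases hv : v = x
        · simp [hv] at hj
          exact ⟨k, hj.symm, by omega, hk, by rw [hsk, hv]⟩
        · rw [if_neg hv] at hj
          obtain ⟨jn, rfl, hjk, hjl, hjv⟩ := hsound v j hj
          exact ⟨jn, rfl, by omega, hjl, hjv⟩
      · intro i h hik
        by_cases heq : s[i] = x
        · refine ⟨(k : Int), ?_, by omega⟩
          rw [heq]
          exact PySem.Dict.get?_insert_self count x (k : Int)
        · rcases Nat.lt_or_ge i k with hik' | hik'
          · obtain ⟨j, hj, hij⟩ := hcomp i h hik'
            exact ⟨j, by rw [PySem.Dict.get?_insert, if_neg heq]; exact hj, hij⟩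
          · exfalso
            apply heq
            simp only [show i = k from by omega]
            exact hsk
      · intro i j hi hj hij hjk hs'
        rcases Nat.lt_or_ge j k with hjk' | hjk'
        · exact hmin i j hi hj hij hjk' hs'
        · have hjeq : j = k := by omega
          subst hjeq
          obtain ⟨j', hj', _⟩ := hcomp i hi hij
          rw [hs', hsk, hget] at hj'
          exact absurd hj' (by simp)
    | some j0 =>
      obtain ⟨jn, hj0, hjnk, hjnl, hjnv⟩ := hsound x j0 hget
      subst hj0
      have hstep : stepA (ret, count) ((k : Int), x) =
          (min ret ((k : Int) - (jn : Int) + 1), count.insert x (k : Int)) := by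
        simp [stepA, hget]
      rw [hstep]
      apply ih (k + 1) _ (count.insert x (k : Int)) hdrop' ?_ ?_ ?_ ?_ ?_
      · intro v j hj
        rw [PySem.Dict.get?_insert] at hj
        by_cases hv : v = x
        · simp [hv] at hj
          exact ⟨k, hj.symm, by omega, hk, by rw [hsk, hv]⟩
        · rw [if_neg hv] at hj
          obtain ⟨jm, rfl, hjk, hjl, hjv⟩ := hsound v j hj
          exact ⟨jm, rfl, by omega, hjl, hjv⟩
      · intro i h hik
        by_cases heq : s[i] = x
        · refine ⟨(k : Int), ?_, by omega⟩
          rw [heq]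
          exact PySem.Dict.get?_insert_self count x (k : Int)
        · rcases Nat.lt_or_ge i k with hik' | hik'
          · obtain ⟨j, hj, hij⟩ := hcomp i h hik'
            exact ⟨j, by rw [PySem.Dict.get?_insert, if_neg heq]; exact hj, hij⟩
          · exfalso
            apply heq
            simp only [show i = k from by omega]
            exact hsk
      · exact le_trans (min_le_left _ _) hle
      · rcases min_choice ret ((k : Int) - (jn : Int) + 1) with h | h
        · rw [h]; exact hmem
        · rw [h]; right
          exact ⟨jn, k, hjnl, hk, hjnk, by rw [hjnv, hsk], rfl⟩
      · intro i j hi hj hij hjk hs'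
        rcases Nat.lt_or_ge j k with hjk' | hjk'
        · exact le_trans (min_le_left _ _) (hmin i j hi hj hij hjk' hs')
        · have hjeq : j = k := by omega
          subst hjeq
          obtain ⟨j', hj', hij'⟩ := hcomp i hi hij
          rw [hs', hsk, hget] at hj'
          have hj'eq : j' = (jn : Int) := by injection hj' with h; exact h.symm
          subst hj'eq
          refine le_trans (min_le_right _ _) ?_
          omega

lemma loopB (s : List Int) : ∀ (xs : List Int) (k : Nat) (best : Int),
    s.drop k = xs →
    best ≤ (s.length : Int) + 1 →
    (best = (s.length : Int) + 1 ∨ PairGap s best) →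
    (∀ i j : Nat, ∀ hi : i < s.length, ∀ hj : j < s.length, i < j → s[i] = s[j] → i < k → best ≤ (j : Int) - (i : Int) + 1) →
    Ch s ((PySem.List.enumerate xs (k : Int)).foldl (stepB s) best) := by
  intro xs
  induction xs with
  | nil =>
    intro k best hdrop hle hmem hmin
    refine ⟨hle, ?_, hmem⟩
    have hk : s.length ≤ k := by
      have := congrArg List.length hdrop; simp at this; omega
    rintro g ⟨i, j, hi, hj, hij, hs, rfl⟩
    exact hmin i j hi hj hij hs (by omega)
  | cons x xs ih =>
    intro k best hdrop hle hmem hmin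
    have hk : k < s.length := by
      by_contra h
      push_neg at h
      rw [List.drop_eq_nil_of_le h] at hdrop
      exact (List.cons_ne_nil x xs) hdrop.symm
    have hsk : s[k] = x := by
      have h0 : (s.drop k)[0]'(by rw [hdrop]; simp) = x := by
        simp [hdrop]
      rwa [List.getElem_drop] at h0
    have hdrop' : s.drop (k + 1) = xs := by
      have h1 : (s.drop k).drop 1 = xs := by rw [hdrop]; simp
      rw [List.drop_drop] at h1
      exact h1
    have hlen : xs.length = s.length - (k + 1) := by
      have := congrArg List.length hdrop'; simp at this; omega
    rw [PySem.List.enumerate_cons, List.foldl_cons]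
    have hcast : (k : Int) + 1 = ((k + 1 : Nat) : Int) := by push_cast; ring
    have hrest : PySem.List.slice s (some ((k : Int) + 1)) none = xs := by
      rw [hcast, PySem.List.slice_from_natCast, hdrop']
    have hstep : stepB s best ((k : Int), x) =
        (if x ∈ xs then
          match PySem.List.index? xs x with
          | some m => min best ((m : Int) + 2)
          | none => best
        else best) := by
      simp only [stepB, hrest]
    rw [hcast, hstep]
    by_cases hx : x ∈ xs
    · obtain ⟨m, hm⟩ := (PySem.List.index?_isSome_iff xs x).2 hx |> Option.isSome_iff_exists.1
      obtain ⟨pre, suf, hxs, hprelen, hxpre⟩ := (PySem.List.index?_eq_some_iff xs x m).1 hm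
      have hmlt : m < xs.length := by rw [hxs, ← hprelen]; simp
      have hxsm : xs[m]'hmlt = x := by
        subst hxs hprelen
        rw [List.getElem_append_right (le_refl pre.length)]
        simp
      have hjlt : k + 1 + m < s.length := by omega
      have hsj : s[k + 1 + m]'hjlt = x := by
        have h1 : (s.drop (k + 1))[m]'(by rw [hdrop']; exact hmlt) = x := by
          simp only [hdrop']
          exact hxsm
        rwa [List.getElem_drop] at h1
      have hminle : ∀ t : Nat, ∀ ht : t < xs.length, xs[t] = x → m ≤ t := by
        intro t ht hxt
        by_contra hlt
        push_neg at hlt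
        have htpre : t < pre.length := by omega
        have : pre[t]'htpre = x := by
          rw [← hxt]
          subst hxs
          rw [List.getElem_append_left htpre]
        exact hxpre (this ▸ List.getElem_mem htpre)
      simp only [hx, if_true, hm]
      apply ih (k + 1) (min best ((m : Int) + 2)) hdrop'
      · exact le_trans (min_le_left _ _) hle
      · rcases min_choice best ((m : Int) + 2) with h | h
        · rw [h]; exact hmem
        · rw [h]; right
          exact ⟨k, k + 1 + m, hk, hjlt, by omega, by rw [hsk, hsj], by push_cast; ring⟩
      · intro i j hi hj hij hs hik
        rcases Nat.lt_or_ge i k with hik' | hik'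
        · exact le_trans (min_le_left _ _) (hmin i j hi hj hij hs hik')
        · have hik'' : i = k := by omega
          subst hik''
          have h2 : (s.drop (i + 1))[j - (i + 1)]'(by rw [hdrop']; omega) = x := by
            rw [List.getElem_drop]
            simp only [show i + 1 + (j - (i + 1)) = j from by omega]
            rw [← hs]
            exact hsk
          have hjx : xs[j - (i + 1)]'(by omega) = x := by
            simp only [hdrop'] at h2
            exact h2
          have := hminle _ _ hjx
          refine le_trans (min_le_right _ _) ?_
          have : (m : Int) ≤ (j : Int) - (i : Int) - 1 := by
            have h2 : m ≤ j - (i + 1) := this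
            omega
          omega
    · simp only [hx, if_false]
      apply ih (k + 1) best hdrop' hle hmem
      intro i j hi hj hij hs hik
      rcases Nat.lt_or_ge i k with hik' | hik'
      · exact hmin i j hi hj hij hs hik'
      · have hik'' : i = k := by omega
        subst hik''
        exfalso
        have h2 : (s.drop (i + 1))[j - (i + 1)]'(by rw [hdrop']; omega) = x := by
          rw [List.getElem_drop]
          simp only [show i + 1 + (j - (i + 1)) = j from by omega]
          rw [← hs]
          exact hsk
        have hjx : xs[j - (i + 1)]'(by omega) = x := by
          simp only [hdrop'] at h2
          exact h2
        exact hx (hjx ▸ List.getElem_mem _)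

-- ===== VERDICT (by name: the statement is the Claim_ definition above) =====
theorem shortes_coupon_spec : Claim_equal_shortes_coupon := by
  intro s _
  unfold Spec_shortes_coupon shortes_coupon shortes_coupon_alt
  have hA := loopA s s 0 ((s.length : Int) + 1) PySem.Dict.empty (by simp)
    (by intro v j h; simp [PySem.Dict.get?_empty] at h)
    (by intro i h h0; omega)
    le_rfl (Or.inl rfl)
    (by intro i j hi hj hij hjk; omega)
  have hB := loopB s s 0 ((s.length : Int) + 1) (by simp)
    le_rfl (Or.inl rfl)
    (by intro i j hi hj hij hs hk; omega)
  simp only [Nat.cast_zero] at hA hB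
  simp only [Ch_unique hA hB]
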